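-- pv_equiv track=rewrite | github.com/0xStryK3R/Scaler-DSA-Revision | python/Day-66/HW_1.py | solve
-- ===== SOURCE A (Python) =====
-- def solve(A, B):
--     A = list(map(int, list(A)))
--     n = len(A)
--     temp = [0] * n
--
--     xr = 0
--     ans = 0
--     i = 0
--     while(i <= n - B):
--         xr ^= temp[i]
--         if A[i]==xr:
--             ans += 1
--             if(i + B < n):
--                 temp[i+B] = 1
--             xr ^= 1
--         i += 1
--
--     while(i < n):
--         xr ^= temp[i]
--         if(A[i] ^ xr == 0):
--             return -1
--         i += 1
--
--     return ans
-- ===== SOURCE B (Python) =====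
-- def solve(A, B):
--     bits = [int(c) for c in A]
--     n = len(bits)
--     ans = 0
--     for i in range(n - B + 1):
--         if bits[i] == 0:
--             ans += 1
--             for j in range(i, i + B):
--                 bits[j] ^= 1
--     return ans if all(bits) else -1
-- ===== Notes on version B (the rewrite author's own statement) =====
-- stated objective: simpler
-- what changed: Replaces A's lazy difference-array + running xor parity (two sequential while-loops with flip-expiry markers) by direct simulation: whenever the current bit is 0, eagerly flip the whole K-window in the bit array, and decide -1 by a final all() check over the mutated array; no parity or expiry bookkeeping at all.
import Mathlib
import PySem

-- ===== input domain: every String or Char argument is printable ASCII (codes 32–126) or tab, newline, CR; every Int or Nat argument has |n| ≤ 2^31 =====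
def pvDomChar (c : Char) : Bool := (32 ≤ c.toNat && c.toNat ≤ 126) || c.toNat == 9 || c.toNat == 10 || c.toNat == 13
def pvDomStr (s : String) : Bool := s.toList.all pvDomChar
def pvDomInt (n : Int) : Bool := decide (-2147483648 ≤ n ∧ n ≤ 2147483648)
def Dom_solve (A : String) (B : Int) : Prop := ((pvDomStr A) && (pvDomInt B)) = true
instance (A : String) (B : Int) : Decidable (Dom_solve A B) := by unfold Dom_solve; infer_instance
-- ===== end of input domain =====

-- B replaces A's lazy difference-array/parity bookkeeping by direct simulation (eagerly
-- flipping each chosen K-window in the bit array, then one final all() check); equal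
-- return values are proved on Pre_solve.

-- ===== PORT A =====
-- int(c) on a one-character string (ValueError = none is excluded by Pre_solve; defaulted outside it)
def pvInt1 (c : Char) : Int := (PySem.Int.ofStr? (String.singleton c)).getD 0

-- xs[i]; on every admitted input the index is in range, so the default is never used
def pvGetD (xs : List Int) (i : Int) : Int := PySem.List.pyGetD xs i 0

-- A's second while-loop: while i < n: xr ^= temp[i]; if A[i]^xr == 0: return -1; i += 1
def solveLoop2 (bits temp : List Int) (n : Int) (xr ans i : Int) : Int :=
  if _h : i < n then
    let xr' := PySem.Int.bxor xr (pvGetD temp i)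
    if PySem.Int.bxor (pvGetD bits i) xr' = 0 then -1
    else solveLoop2 bits temp n xr' ans (i + 1)
  else ans
termination_by (n - i).toNat
decreasing_by omega

-- A's first while-loop: while i <= n - B: … ; falls through into the second loop
def solveLoop1 (bits : List Int) (n B : Int) (temp : List Int) (xr ans i : Int) : Int :=
  if _h : i ≤ n - B then
    let xr' := PySem.Int.bxor xr (pvGetD temp i)
    if pvGetD bits i = xr' then
      solveLoop1 bits n B (if i + B < n then PySem.List.pySetD temp (i + B) 1 else temp)
        (PySem.Int.bxor xr' 1) (ans + 1) (i + 1)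
    else solveLoop1 bits n B temp xr' ans (i + 1)
  else solveLoop2 bits temp n xr ans i
termination_by (n - B + 1 - i).toNat
decreasing_by all_goals omega

def solve (A : String) (B : Int) : Int :=
  let bits := A.toList.map pvInt1
  solveLoop1 bits (bits.length : Int) B (List.replicate bits.length 0) 0 0 0

-- ===== PORT B =====
-- B's inner loop: for j in range(i, i+B): bits[j] ^= 1
def altFlip (bl : List Int) (j stop : Int) : List Int :=
  if _h : j < stop then
    altFlip (PySem.List.pySetD bl j (PySem.Int.bxor (pvGetD bl j) 1)) (j + 1) stop
  else bl
termination_by (stop - j).toNat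
decreasing_by omega

-- B's outer loop over range(n - B + 1), then the final 'ans if all(bits) else -1'
def altLoop (n B : Int) (bl : List Int) (ans i : Int) : Int :=
  if _h : i < n - B + 1 then
    if pvGetD bl i = 0 then
      altLoop n B (altFlip bl i (i + B)) (ans + 1) (i + 1)
    else altLoop n B bl ans (i + 1)
  else if bl.all (fun x => x != 0) then ans else -1
termination_by (n - B + 1 - i).toNat
decreasing_by all_goals omega

def solve_alt (A : String) (B : Int) : Int :=
  let bits := A.toList.map pvInt1
  altLoop (bits.length : Int) B bits 0 0

-- ===== PRECONDITION & SPEC =====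
-- Pre_solve excludes exactly the inputs where Python A raises: a non-digit character
-- (ValueError from int(c)) or B ≤ 0 (IndexError: the first loop reads temp[n]).
def Pre_solve (A : String) (B : Int) : Prop :=
  A.toList.all (fun c => c.isDigit) = true ∧ 1 ≤ B
instance (A : String) (B : Int) : Decidable (Pre_solve A B) := by unfold Pre_solve; infer_instance

def pvWitness_solve : String × Int := ("11011", 2)

def Spec_solve (A : String) (B : Int) (out : Int) : Prop := out = solve_alt A B
instance (A : String) (B : Int) (out : Int) : Decidable (Spec_solve A B out) := by unfold Spec_solve; infer_instance

-- ===== CLAIM (what is proved, stated in full; the proofs are below) =====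
def Claim_equal_solve : Prop := ∀ (A : String) (B : Int), Dom_solve A B → Pre_solve A B → Spec_solve A B (solve A B)

-- ===== LEMMAS AND PROOFS =====

-- int(c) is nonnegative for a digit character
theorem pvInt1_digit_nonneg (c : Char) (h : c.isDigit = true) : 0 ≤ pvInt1 c := by
  simp [Char.isDigit] at h
  have h1 : 48 ≤ c.toNat := UInt32.le_iff_toNat_le.mp h.1
  have h2 : c.toNat ≤ 57 := UInt32.le_iff_toNat_le.mp h.2
  have hofn : Char.ofNat c.toNat = c := Char.ofNat_toNat c
  set m := c.toNat with hm
  clear_value m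
  interval_cases m <;> (rw [← hofn]; decide)

-- a ^ b == 0 iff a == b (Python xor on arbitrary ints)
theorem bxor_eq_zero_iff (a b : Int) : PySem.Int.bxor a b = 0 ↔ a = b := by
  unfold PySem.Int.bxor
  split_ifs with h1 h2 h3 <;> constructor <;> intro h
  · have : a.toNat ^^^ b.toNat = 0 := by exact_mod_cast h
    have := Nat.xor_eq_zero_iff.mp this; omega
  · subst h; simp
  · exfalso
    have : (0:Int) ≤ ((a.toNat ^^^ (-b-1).toNat : Nat) : Int) := by positivity
    omega
  · omega
  · exfalso
    have : (0:Int) ≤ (((-a-1).toNat ^^^ b.toNat : Nat) : Int) := by positivity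
    omega
  · omega
  · have : (-a-1).toNat ^^^ (-b-1).toNat = 0 := by exact_mod_cast h
    have := Nat.xor_eq_zero_iff.mp this; omega
  · subst h; simp

theorem bxor_nonneg (a b : Int) (ha : 0 ≤ a) (hb : 0 ≤ b) : 0 ≤ PySem.Int.bxor a b := by
  rw [PySem.Int.bxor_of_nonneg ha hb]; positivity

theorem bxor_assoc3 (a b c : Int) (ha : 0 ≤ a) (hb : 0 ≤ b) (hc : 0 ≤ c) :
    PySem.Int.bxor (PySem.Int.bxor a b) c = PySem.Int.bxor a (PySem.Int.bxor b c) := by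
  rw [PySem.Int.bxor_of_nonneg ha hb, PySem.Int.bxor_of_nonneg hb hc,
      PySem.Int.bxor_of_nonneg (by positivity) hc, PySem.Int.bxor_of_nonneg ha (by positivity)]
  simp [Nat.xor_assoc]

theorem bxor_cancel1 (x : Int) (hx : 0 ≤ x) :
    PySem.Int.bxor (PySem.Int.bxor x 1) 1 = x := by
  rw [bxor_assoc3 x 1 1 hx (by norm_num) (by norm_num)]
  have h11 : PySem.Int.bxor 1 1 = 0 := by decide
  rw [h11, PySem.Int.bxor_zero]

-- indexing a pySetD-updated list (indices ≥ 0, target in range)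
theorem pvGetD_set (temp : List Int) (p v : Int) (hp : 0 ≤ p) (hlen : p < (temp.length : Int))
    (k : Int) (hk : 0 ≤ k) :
    pvGetD (PySem.List.pySetD temp p v) k = if k = p then v else pvGetD temp k := by
  unfold pvGetD
  rw [PySem.List.pySetD_of_nonneg temp v hp,
      PySem.List.pyGetD_of_nonneg _ 0 hk, PySem.List.pyGetD_of_nonneg _ 0 hk]
  by_cases hkp : k = p
  · subst hkp
    have hlt : k.toNat < temp.length := by omega
    simp [List.getD, hlt]
  · simp [List.getD, List.getElem?_set]
    rw [if_neg (show ¬ p.toNat = k.toNat by omega), if_neg hkp]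

theorem pvGetD_nonneg_of_forall (xs : List Int) (h : ∀ x ∈ xs, 0 ≤ x) (k : Int) (hk : 0 ≤ k) :
    0 ≤ pvGetD xs k := by
  unfold pvGetD
  rw [PySem.List.pyGetD_of_nonneg _ 0 hk]
  rcases lt_or_ge k.toNat xs.length with hlt | hge
  · rw [List.getD_eq_getElem _ _ hlt]
    exact h _ (List.getElem_mem _)
  · rw [List.getD_eq_default _ _ hge]

-- running xor of temp[i..j] starting from xr (A's lazy parity, as a function)
def cov (temp : List Int) (xr i j : Int) : Int :=
  if _h : i ≤ j then cov temp (PySem.Int.bxor xr (pvGetD temp i)) (i + 1) j else xr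
termination_by (j + 1 - i).toNat
decreasing_by omega

theorem cov_step (temp : List Int) (xr i j : Int) (h : i ≤ j) :
    cov temp xr i j = cov temp (PySem.Int.bxor xr (pvGetD temp i)) (i + 1) j := by
  rw [cov]; simp [h]

theorem cov_stop (temp : List Int) (xr i j : Int) (h : ¬ i ≤ j) : cov temp xr i j = xr := by
  rw [cov]; simp [h]

theorem cov_single (temp : List Int) (xr i : Int) :
    cov temp xr i i = PySem.Int.bxor xr (pvGetD temp i) := by
  rw [cov_step temp xr i i le_rfl, cov_stop _ _ _ _ (by omega)]

theorem cov_nonneg (temp : List Int) (hT : ∀ k, 0 ≤ k → 0 ≤ pvGetD temp k) :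
    ∀ (m : Nat) (i j xr : Int), (j + 1 - i).toNat = m → 0 ≤ i → 0 ≤ xr →
    0 ≤ cov temp xr i j := by
  intro m
  induction m with
  | zero => intro i j xr hm hi hxr; rw [cov_stop _ _ _ _ (by omega)]; exact hxr
  | succ m ih =>
    intro i j xr hm hi hxr
    by_cases h : i ≤ j
    · rw [cov_step _ _ _ _ h]
      exact ih (i+1) j _ (by omega) (by omega) (bxor_nonneg _ _ hxr (hT i hi))
    · rw [cov_stop _ _ _ _ h]; exact hxr

theorem cov_pull (temp : List Int) (hT : ∀ k, 0 ≤ k → 0 ≤ pvGetD temp k) :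
    ∀ (m : Nat) (i j xr c : Int), (j + 1 - i).toNat = m → 0 ≤ i → 0 ≤ xr → 0 ≤ c →
    cov temp (PySem.Int.bxor xr c) i j = PySem.Int.bxor (cov temp xr i j) c := by
  intro m
  induction m with
  | zero =>
    intro i j xr c hm hi hxr hc
    rw [cov_stop _ _ _ _ (by omega), cov_stop _ _ _ _ (by omega)]
  | succ m ih =>
    intro i j xr c hm hi hxr hc
    by_cases h : i ≤ j
    · rw [cov_step _ _ _ _ h, cov_step _ _ _ _ h]
      have ht := hT i hi
      have e : PySem.Int.bxor (PySem.Int.bxor xr c) (pvGetD temp i)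
          = PySem.Int.bxor (PySem.Int.bxor xr (pvGetD temp i)) c := by
        rw [bxor_assoc3 _ _ _ hxr hc ht, bxor_assoc3 _ _ _ hxr ht hc,
            PySem.Int.bxor_comm c (pvGetD temp i)]
      rw [e]
      exact ih (i+1) j _ c (by omega) (by omega) (bxor_nonneg _ _ hxr ht) hc
    · rw [cov_stop _ _ _ _ h, cov_stop _ _ _ _ h]

theorem cov_congr (t1 t2 : List Int) :
    ∀ (m : Nat) (i j xr : Int), (j + 1 - i).toNat = m →
    (∀ k, i ≤ k → k ≤ j → pvGetD t1 k = pvGetD t2 k) →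
    cov t1 xr i j = cov t2 xr i j := by
  intro m
  induction m with
  | zero => intro i j xr hm _; rw [cov_stop _ _ _ _ (by omega), cov_stop _ _ _ _ (by omega)]
  | succ m ih =>
    intro i j xr hm hagree
    by_cases h : i ≤ j
    · rw [cov_step _ _ _ _ h, cov_step _ _ _ _ h, hagree i le_rfl h]
      exact ih (i+1) j _ (by omega) (fun k hk1 hk2 => hagree k (by omega) hk2)
    · rw [cov_stop _ _ _ _ h, cov_stop _ _ _ _ h]

-- setting a fresh 1 inside the scanned range toggles the scan result
theorem cov_set_one (temp : List Int) (p : Int) (hp0 : 0 ≤ p) (hplen : p < (temp.length : Int))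
    (hpz : pvGetD temp p = 0) (hT : ∀ k, 0 ≤ k → 0 ≤ pvGetD temp k) :
    ∀ (m : Nat) (i j xr : Int), (j + 1 - i).toNat = m → 0 ≤ i → 0 ≤ xr → i ≤ p → p ≤ j →
    cov (PySem.List.pySetD temp p 1) xr i j = PySem.Int.bxor (cov temp xr i j) 1 := by
  intro m
  induction m with
  | zero => intro i j xr hm hi hxr hip hpj; omega
  | succ m ih =>
    intro i j xr hm hi hxr hip hpj
    have hij : i ≤ j := by omega
    by_cases hipe : i = p
    · subst hipe
      rw [cov_step _ _ _ _ hij, cov_step _ _ _ _ hij,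
          pvGetD_set temp i 1 hi hplen i hi, if_pos rfl, hpz, PySem.Int.bxor_zero]
      have hc : cov (PySem.List.pySetD temp i 1) (PySem.Int.bxor xr 1) (i+1) j
          = cov temp (PySem.Int.bxor xr 1) (i+1) j := by
        refine cov_congr _ _ (j + 1 - (i+1)).toNat (i+1) j _ rfl ?_
        intro k hk1 hk2
        rw [pvGetD_set temp i 1 hi hplen k (by omega), if_neg (by omega)]
      rw [hc]
      exact cov_pull temp hT (j + 1 - (i+1)).toNat (i+1) j xr 1 rfl (by omega) hxr (by norm_num)
    · rw [cov_step _ _ _ _ hij, cov_step _ _ _ _ hij,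
          pvGetD_set temp p 1 hp0 hplen i hi, if_neg (by omega)]
      exact ih (i+1) j _ (by omega) (by omega) (bxor_nonneg _ _ hxr (hT i hi)) (by omega) hpj

-- all-zero temp scans to xr
theorem cov_zero (temp : List Int) (hT : ∀ k, 0 ≤ k → pvGetD temp k = 0) :
    ∀ (m : Nat) (i j xr : Int), (j + 1 - i).toNat = m → 0 ≤ i →
    cov temp xr i j = xr := by
  intro m
  induction m with
  | zero => intro i j xr hm hi; rw [cov_stop _ _ _ _ (by omega)]
  | succ m ih =>
    intro i j xr hm hi
    by_cases h : i ≤ j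
    · rw [cov_step _ _ _ _ h, hT i hi, PySem.Int.bxor_zero]
      exact ih (i+1) j xr (by omega) (by omega)
    · rw [cov_stop _ _ _ _ h]

theorem altFlip_length (bl : List Int) (j stop : Int) :
    (altFlip bl j stop).length = bl.length := by
  rw [altFlip]
  split
  · rw [altFlip_length, PySem.List.length_pySetD]
  · rfl
termination_by (stop - j).toNat
decreasing_by omega

theorem altFlip_get (bl : List Int) (j stop : Int) (hj : 0 ≤ j)
    (hstop : stop ≤ (bl.length : Int)) (k : Int) (hk : 0 ≤ k) :
    pvGetD (altFlip bl j stop) k =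
      if j ≤ k ∧ k < stop then PySem.Int.bxor (pvGetD bl k) 1 else pvGetD bl k := by
  rw [altFlip]
  split
  · rename_i h
    rw [altFlip_get _ (j+1) stop (by omega) (by rw [PySem.List.length_pySetD]; omega) k hk,
        pvGetD_set bl j _ hj (by omega) k hk]
    by_cases h1 : j + 1 ≤ k ∧ k < stop
    · rw [if_pos h1, if_neg (show ¬ k = j by omega),
          if_pos (show j ≤ k ∧ k < stop by omega)]
    · rw [if_neg h1]
      by_cases h2 : k = j
      · rw [if_pos h2, if_pos (show j ≤ k ∧ k < stop by omega), h2]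
      · rw [if_neg h2, if_neg (show ¬ (j ≤ k ∧ k < stop) by omega)]
  · rename_i h
    rw [if_neg (by omega)]
termination_by (stop - j).toNat
decreasing_by omega

theorem pvGetD_elem (bl : List Int) (i : Int) (h0 : 0 ≤ i) (h1 : i < (bl.length : Int)) :
    pvGetD bl i = bl[i.toNat]'(by omega) := by
  unfold pvGetD
  rw [PySem.List.pyGetD_eq_getElem bl 0 h0 (by omega)]

theorem pvGetD_replicate_zero (n : Nat) (k : Int) (hk : 0 ≤ k) :
    pvGetD (List.replicate n (0:Int)) k = 0 := by
  unfold pvGetD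
  rw [PySem.List.pyGetD_of_nonneg _ 0 hk]
  rcases lt_or_ge k.toNat n with hlt | hge
  · rw [List.getD_eq_getElem _ _ (by simpa using hlt)]
    simp
  · rw [List.getD_eq_default _ _ (by simpa using hge)]

-- A's tail loop equals B's final all() check, given the coupling
theorem loop2_eq (bits temp bl : List Int) (n ans : Int)
    (hlen : (bl.length : Int) = n) :
    ∀ (m : Nat) (i xr : Int), (n - i).toNat = m → 0 ≤ i →
    (∀ j, 0 ≤ j → j < i → pvGetD bl j ≠ 0) →
    (∀ j, i ≤ j → j < n → pvGetD bl j = PySem.Int.bxor (pvGetD bits j) (cov temp xr i j)) →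
    solveLoop2 bits temp n xr ans i = (if bl.all (fun x => x != 0) then ans else -1) := by
  intro m
  induction m with
  | zero =>
    intro i xr hm hi hpre _
    rw [solveLoop2, dif_neg (by omega), if_pos]
    refine List.all_eq_true.mpr ?_
    intro x hx
    obtain ⟨idx, hidx, rfl⟩ := List.mem_iff_getElem.mp hx
    have := hpre (idx : Int) (by omega) (by omega)
    rw [pvGetD_elem bl idx (by omega) (by omega)] at this
    simpa using this
  | succ m ih =>
    intro i xr hm hi hpre hsuf
    by_cases hin : i < n
    swap
    · rw [solveLoop2, dif_neg (by omega), if_pos]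
      refine List.all_eq_true.mpr ?_
      intro x hx
      obtain ⟨idx, hidx, rfl⟩ := List.mem_iff_getElem.mp hx
      have := hpre (idx : Int) (by omega) (by omega)
      rw [pvGetD_elem bl idx (by omega) (by omega)] at this
      simpa using this
    · have hbli : pvGetD bl i
          = PySem.Int.bxor (pvGetD bits i) (PySem.Int.bxor xr (pvGetD temp i)) := by
        rw [hsuf i le_rfl hin, cov_single]
      rw [solveLoop2, dif_pos hin]
      by_cases hc : PySem.Int.bxor (pvGetD bits i) (PySem.Int.bxor xr (pvGetD temp i)) = 0
      · rw [if_pos hc]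
        have hz : pvGetD bl i = 0 := by rw [hbli, hc]
        rw [pvGetD_elem bl i (by omega) (by omega)] at hz
        rw [if_neg]
        intro hall
        have := List.all_eq_true.mp hall (bl[i.toNat]'(by omega)) (List.getElem_mem _)
        rw [hz] at this
        simp at this
      · rw [if_neg hc]
        refine ih (i+1) (PySem.Int.bxor xr (pvGetD temp i)) (by omega) (by omega) ?_ ?_
        · intro j hj0 hj1
          by_cases hje : j = i
          · subst hje; rw [hbli]; exact hc
          · exact hpre j hj0 (by omega)
        · intro j hj0 hj1
          rw [hsuf j (by omega) hj1, cov_step _ _ _ _ (by omega)]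

-- the two programs' loops agree from any coupled pair of states
theorem loops_eq (bits : List Int) (n B : Int) (hB : 1 ≤ B)
    (hBits : ∀ k, 0 ≤ k → 0 ≤ pvGetD bits k) :
    ∀ (m : Nat) (i xr ans : Int) (temp bl : List Int), (n - B + 1 - i).toNat = m → 0 ≤ i → 0 ≤ xr →
    (temp.length : Int) = n → (bl.length : Int) = n →
    (∀ k, 0 ≤ k → 0 ≤ pvGetD temp k) →
    (∀ k, i + B ≤ k → 0 ≤ k → pvGetD temp k = 0) →
    (∀ j, 0 ≤ j → j < i → pvGetD bl j ≠ 0) →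
    (∀ j, i ≤ j → j < n → pvGetD bl j = PySem.Int.bxor (pvGetD bits j) (cov temp xr i j)) →
    solveLoop1 bits n B temp xr ans i = altLoop n B bl ans i := by
  intro m
  induction m with
  | zero =>
    intro i xr ans temp bl hm hi hxr hlt hlb hT hZ hpre hsuf
    rw [solveLoop1, dif_neg (by omega), altLoop, dif_neg (by omega)]
    exact loop2_eq bits temp bl n ans hlb (n - i).toNat i xr rfl hi hpre hsuf
  | succ m ih =>
    intro i xr ans temp bl hm hi hxr hlt hlb hT hZ hpre hsuf
    by_cases hle : i ≤ n - B
    swap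
    · rw [solveLoop1, dif_neg hle, altLoop, dif_neg (by omega)]
      exact loop2_eq bits temp bl n ans hlb (n - i).toNat i xr rfl hi hpre hsuf
    · have hiBn : i + B ≤ n := by omega
      rw [solveLoop1, dif_pos hle, altLoop, dif_pos (show i < n - B + 1 by omega)]
      have htempi := hT i hi
      have hxr' : 0 ≤ PySem.Int.bxor xr (pvGetD temp i) := bxor_nonneg _ _ hxr htempi
      have hbli : pvGetD bl i
          = PySem.Int.bxor (pvGetD bits i) (PySem.Int.bxor xr (pvGetD temp i)) := by
        rw [hsuf i le_rfl (by omega), cov_single]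
      have hcond : (pvGetD bl i = 0) ↔ (pvGetD bits i = PySem.Int.bxor xr (pvGetD temp i)) := by
        rw [hbli, bxor_eq_zero_iff]
      by_cases hc : pvGetD bits i = PySem.Int.bxor xr (pvGetD temp i)
      · rw [if_pos hc, if_pos (hcond.mpr hc)]
        refine ih (i+1) _ (ans+1) _ (altFlip bl i (i + B)) (by omega) (by omega)
          (bxor_nonneg _ _ hxr' (by norm_num)) ?_ ?_ ?_ ?_ ?_ ?_
        · split
          · rw [PySem.List.length_pySetD]; exact hlt
          · exact hlt
        · rw [show ((altFlip bl i (i + B)).length : Int) = (bl.length : Int) by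
            rw [altFlip_length]]
          exact hlb
        · intro k hk
          split
          · rename_i hsp
            rw [pvGetD_set temp (i+B) 1 (by omega) (by omega) k hk]
            split
            · norm_num
            · exact hT k hk
          · exact hT k hk
        · intro k hk hk0
          split
          · rename_i hsp
            rw [pvGetD_set temp (i+B) 1 (by omega) (by omega) k hk0, if_neg (by omega)]
            exact hZ k (by omega) hk0
          · exact hZ k (by omega) hk0
        · intro j hj0 hj1
          rw [altFlip_get bl i (i + B) hi (by omega) j hj0]
          by_cases hje : j = i
          · subst hje
            rw [if_pos (by omega), hcond.mpr hc]
            decide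
          · rw [if_neg (by omega)]
            exact hpre j hj0 (by omega)
        · intro j hj1 hjn
          rw [altFlip_get bl i (i + B) hi (by omega) j (by omega)]
          have hblj : pvGetD bl j
              = PySem.Int.bxor (pvGetD bits j)
                  (cov temp (PySem.Int.bxor xr (pvGetD temp i)) (i+1) j) := by
            rw [hsuf j (by omega) hjn, cov_step _ _ _ _ (by omega)]
          have hXnn : 0 ≤ cov temp (PySem.Int.bxor xr (pvGetD temp i)) (i+1) j :=
            cov_nonneg temp hT (j + 1 - (i+1)).toNat (i+1) j _ rfl (by omega) hxr'
          by_cases hjw : j < i + B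
          · rw [if_pos (by omega), hblj]
            have hcov2 : cov (if i + B < n then PySem.List.pySetD temp (i + B) 1 else temp)
                (PySem.Int.bxor (PySem.Int.bxor xr (pvGetD temp i)) 1) (i+1) j
                = PySem.Int.bxor (cov temp (PySem.Int.bxor xr (pvGetD temp i)) (i+1) j) 1 := by
              have hcg : cov (if i + B < n then PySem.List.pySetD temp (i + B) 1 else temp)
                  (PySem.Int.bxor (PySem.Int.bxor xr (pvGetD temp i)) 1) (i+1) j
                  = cov temp (PySem.Int.bxor (PySem.Int.bxor xr (pvGetD temp i)) 1) (i+1) j := by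
                split
                · refine cov_congr _ _ (j + 1 - (i+1)).toNat (i+1) j _ rfl ?_
                  intro k hk1 hk2
                  rw [pvGetD_set temp (i+B) 1 (by omega) (by omega) k (by omega),
                      if_neg (by omega)]
                · rfl
              rw [hcg]
              exact cov_pull temp hT (j + 1 - (i+1)).toNat (i+1) j _ 1 rfl (by omega)
                hxr' (by norm_num)
            rw [hcov2]
            exact (bxor_assoc3 _ _ 1 (hBits j (by omega)) hXnn (by norm_num)).symm ▸
              (bxor_assoc3 (pvGetD bits j) _ 1 (hBits j (by omega)) hXnn (by norm_num))
          · have hset : i + B < n := by omega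
            rw [if_neg (by omega), hblj, if_pos hset]
            have h1 : cov (PySem.List.pySetD temp (i + B) 1)
                (PySem.Int.bxor (PySem.Int.bxor xr (pvGetD temp i)) 1) (i+1) j
                = PySem.Int.bxor (cov (PySem.List.pySetD temp (i + B) 1)
                    (PySem.Int.bxor xr (pvGetD temp i)) (i+1) j) 1 := by
              refine cov_pull (PySem.List.pySetD temp (i + B) 1) ?_
                (j + 1 - (i+1)).toNat (i+1) j _ 1 rfl (by omega) hxr' (by norm_num)
              intro k hk
              rw [pvGetD_set temp (i+B) 1 (by omega) (by omega) k hk]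
              split
              · norm_num
              · exact hT k hk
            have h2 : cov (PySem.List.pySetD temp (i + B) 1)
                (PySem.Int.bxor xr (pvGetD temp i)) (i+1) j
                = PySem.Int.bxor (cov temp (PySem.Int.bxor xr (pvGetD temp i)) (i+1) j) 1 :=
              cov_set_one temp (i+B) (by omega) (by omega) (hZ (i+B) le_rfl (by omega)) hT
                (j + 1 - (i+1)).toNat (i+1) j _ rfl (by omega) hxr' (by omega) (by omega)
            rw [h1, h2, bxor_cancel1 _ hXnn]
      · rw [if_neg hc, if_neg (fun h => hc (hcond.mp h))]
        refine ih (i+1) _ ans temp bl (by omega) (by omega) hxr' hlt hlb hT ?_ ?_ ?_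
        · intro k hk hk0
          exact hZ k (by omega) hk0
        · intro j hj0 hj1
          by_cases hje : j = i
          · subst hje
            intro h0
            exact hc (hcond.mp h0)
          · exact hpre j hj0 (by omega)
        · intro j hj1 hjn
          rw [hsuf j (by omega) hjn, cov_step _ _ _ _ (by omega)]

-- ===== VERDICT (by name: the statement is the Claim_ definition above) =====
theorem solve_spec : Claim_equal_solve := by
  intro A B _hDom hPre
  obtain ⟨hdig', hB⟩ := hPre
  have hdig : ∀ c ∈ A.toList, c.isDigit = true := List.all_eq_true.mp hdig'
  unfold Spec_solve solve solve_alt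
  have hBits : ∀ k, 0 ≤ k → 0 ≤ pvGetD (A.toList.map pvInt1) k := by
    intro k hk
    refine pvGetD_nonneg_of_forall _ ?_ k hk
    intro x hx
    obtain ⟨c, hc, rfl⟩ := List.mem_map.mp hx
    exact pvInt1_digit_nonneg c (hdig c hc)
  refine loops_eq (A.toList.map pvInt1) ((A.toList.map pvInt1).length : Int) B hB hBits
    ((((A.toList.map pvInt1).length : Int) - B + 1 - 0).toNat) 0 0 0
    (List.replicate (A.toList.map pvInt1).length 0) (A.toList.map pvInt1)
    rfl le_rfl le_rfl (by simp) rfl ?_ ?_ ?_ ?_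
  · intro k hk
    rw [pvGetD_replicate_zero _ k hk]
  · intro k _ hk0
    exact pvGetD_replicate_zero _ k hk0
  · intro j hj0 hj1
    omega
  · intro j hj0 hjn
    rw [cov_zero (List.replicate (A.toList.map pvInt1).length 0)
          (fun k hk => pvGetD_replicate_zero _ k hk) (j + 1 - 0).toNat 0 j 0 rfl le_rfl,
        PySem.Int.bxor_zero]
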